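-- pv_equiv track=rewrite | github.com/ValentinGuillon/semestre_4 | 2_systemes-reseaux/tp1/exo3.py | debourrage
-- ===== SOURCE A (Python) =====
-- def debourrage(trame:str) -> str:
--     new_trame = ""
--     skip = True
--
--     for digit in trame:
--         if digit == "1":
--             skip = False
--
--         if not skip:
--             new_trame += digit
--             continue
--
--
--     return new_trame
-- ===== SOURCE B (Python) =====
-- def debourrage(trame: str) -> str:
--     i = trame.find("1")
--     if i == -1:
--         return ""
--     return trame[i:]
-- ===== Notes on version B (the rewrite author's own statement) =====
-- stated objective: simpler
-- what changed: Replaces the skip-flag accumulation loop that builds the output character by character with a single locate-then-slice: find the index of the first '1' and return the suffix from there (empty string if absent).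
import Mathlib
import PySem

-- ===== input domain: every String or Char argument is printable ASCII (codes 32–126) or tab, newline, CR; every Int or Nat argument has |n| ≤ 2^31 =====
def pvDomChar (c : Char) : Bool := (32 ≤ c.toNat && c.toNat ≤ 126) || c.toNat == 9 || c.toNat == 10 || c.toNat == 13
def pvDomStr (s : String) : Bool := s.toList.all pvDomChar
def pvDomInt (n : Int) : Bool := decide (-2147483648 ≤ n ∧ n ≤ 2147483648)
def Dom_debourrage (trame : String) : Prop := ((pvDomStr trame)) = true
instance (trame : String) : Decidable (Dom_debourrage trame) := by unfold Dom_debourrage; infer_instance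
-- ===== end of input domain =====

-- B replaces A's skip-flag accumulation loop by locate-then-slice (find the first '1', return the suffix); objective: simpler.

-- ===== PORT A =====
-- step of A's for-loop: state = (new_trame, skip)
def debourrageStep (st : List Char × Bool) (digit : Char) : List Char × Bool :=
  let skip := if digit == '1' then false else st.2
  if skip = false then (st.1 ++ [digit], skip) else (st.1, skip)

def debourrage (trame : String) : String :=
  let r := trame.toList.foldl debourrageStep ([], true)
  String.ofList r.1

-- ===== PORT B =====
def debourrage_alt (trame : String) : String :=
  let i := PySem.Str.find trame "1"
  if i = -1 then ""
  else String.ofList (PySem.List.slice trame.toList (some i) none)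

-- ===== PRECONDITION & SPEC =====
def Spec_debourrage (trame : String) (out : String) : Prop := out = debourrage_alt trame
instance (trame : String) (out : String) : Decidable (Spec_debourrage trame out) := by unfold Spec_debourrage; infer_instance

-- ===== CLAIM (what is proved, stated in full; the proofs are below) =====
def Claim_equal_debourrage : Prop := ∀ (trame : String), Dom_debourrage trame → Spec_debourrage trame (debourrage trame)

-- ===== LEMMAS AND PROOFS =====

-- once skip is false, every remaining character is appended
theorem foldl_step_false (l : List Char) (acc : List Char) :
    l.foldl debourrageStep (acc, false) = (acc ++ l, false) := by
  induction l generalizing acc with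
  | nil => simp
  | cons c t ih =>
      simp only [List.foldl_cons, debourrageStep]
      by_cases h : c == '1' <;> simp [h, ih]

-- starting with skip = true, A accumulates exactly the suffix from the first '1'
theorem foldl_step_true (l : List Char) (acc : List Char) :
    (l.foldl debourrageStep (acc, true)).1 = acc ++ l.dropWhile (fun c => !(c == '1')) := by
  induction l generalizing acc with
  | nil => simp
  | cons c t ih =>
      by_cases h : c == '1'
      · simp only [List.foldl_cons, debourrageStep, h]
        simp [foldl_step_false, h]
      · simp only [List.foldl_cons, debourrageStep, h]
        simp [ih, h]

theorem singleton_prefix_iff (a : Char) (l : List Char) :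
    [a] <+: l ↔ l.head? = some a := by
  cases l with
  | nil => simp
  | cons c t => constructor
                · intro h
                  rcases h with ⟨r, hr⟩
                  simp at hr
                  simp [hr.1]
                · intro h
                  simp at h
                  exact ⟨t, by simp [h]⟩

theorem singleton_infix_iff (a : Char) (l : List Char) :
    [a] <:+: l ↔ a ∈ l := by
  constructor
  · intro h
    exact h.subset (by simp)
  · intro h
    rcases List.append_of_mem h with ⟨s, t, rfl⟩
    exact ⟨s, t, by simp⟩

-- dropWhile (≠ '1') is drop at the first index of '1'
theorem dropWhile_eq_drop_of_first (l : List Char) (i : Nat)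
    (hi : l[i]? = some '1') (hmin : ∀ j, j < i → l[j]? ≠ some '1') :
    l.dropWhile (fun c => !(c == '1')) = l.drop i := by
  induction l generalizing i with
  | nil => simp at hi
  | cons c t ih =>
      by_cases h : c = '1'
      · have hi0 : i = 0 := by
          by_contra hne
          exact hmin 0 (Nat.pos_of_ne_zero hne) (by simp [h])
        subst hi0
        simp [h]
      · cases i with
        | zero => simp [h] at hi
        | succ j =>
            have ht : t[j]? = some '1' := by simpa using hi
            have hmt : ∀ k, k < j → t[k]? ≠ some '1' := by
              intro k hk
              have := hmin (k + 1) (by omega)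
              simpa using this
            simp [h, ih j ht hmt]

theorem debourrage_toList_eq (trame : String) :
    debourrage trame = String.ofList (trame.toList.dropWhile (fun c => !(c == '1'))) := by
  show String.ofList (trame.toList.foldl debourrageStep ([], true)).1 = _
  rw [foldl_step_true]
  simp

-- ===== VERDICT (by name: the statement is the Claim_ definition above) =====
theorem debourrage_spec : Claim_equal_debourrage := by
  unfold Claim_equal_debourrage
  intro trame _
  unfold Spec_debourrage
  show debourrage trame =
    (if PySem.Str.find trame "1" = -1 then ""
     else String.ofList (PySem.List.slice trame.toList (some (PySem.Str.find trame "1")) none))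
  rw [debourrage_toList_eq]
  set l := trame.toList with hl
  have hfind : PySem.Str.find trame "1" = PySem.Chars.find l ['1'] := by
    simp [PySem.Str.find, hl]
  by_cases hmem : '1' ∈ l
  · -- find succeeds; B slices at the first index, which equals dropWhile
    have hne : PySem.Chars.find l ['1'] ≠ -1 := fun hEq =>
      ((PySem.Chars.find_eq_neg_one_iff l ['1']).mp hEq) ((singleton_infix_iff '1' l).mpr hmem)
    have hzero : PySem.Chars.findFrom l ['1'] ((0 : Nat) : Int) = PySem.Chars.find l ['1'] := by
      simpa using PySem.Chars.findFrom_zero l ['1']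
    have hspec := PySem.Chars.findFrom_natCast_spec l ['1'] 0 (Nat.zero_le _)
      (by rw [hzero]; exact hne)
    rw [hzero] at hspec
    obtain ⟨hge, hpre, hmin⟩ := hspec
    set i := (PySem.Chars.find l ['1']).toNat with hi
    have hnonneg : (0 : Int) ≤ PySem.Chars.find l ['1'] := by exact_mod_cast hge
    have higet : l[i]? = some '1' := by
      rw [singleton_prefix_iff] at hpre
      simpa [List.head?_drop] using hpre
    have himin : ∀ j, j < i → l[j]? ≠ some '1' := by
      intro j hj hget
      exact hmin j (Nat.zero_le _) hj (by rw [singleton_prefix_iff]; simpa [List.head?_drop])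
    rw [hfind, if_neg hne, dropWhile_eq_drop_of_first l i higet himin]
    rw [PySem.List.slice_from l hnonneg]
  · -- no '1': find = -1 and dropWhile empties the list
    have h1 : PySem.Chars.find l ['1'] = -1 := by
      rw [PySem.Chars.find_eq_neg_one_iff, singleton_infix_iff]
      exact hmem
    rw [hfind, if_pos h1]
    have hdw : l.dropWhile (fun c => !(c == '1')) = [] := by
      rw [List.dropWhile_eq_nil_iff]
      intro x hx
      have hx1 : x ≠ '1' := fun h => hmem (h ▸ hx)
      simp [hx1]
    rw [hdw]
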